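-- pv_equiv track=rewrite | github.com/outdoorbengal/lisa-dashboard | scripts/build_data.py | build_donuts
-- ===== SOURCE A (Python) =====
-- def build_donuts(archive: dict) -> dict:
--     """Count win/total by sprint_type from archived experiments."""
--     completed = archive.get("experiments", [])
--
--     categories = ["RNK", "CTR", "CR", "LINK"]
--     counts = {cat: {"win": 0, "total": 0} for cat in categories}
--
--     for exp in completed:
--         st = exp.get("sprint_type")
--         status = exp.get("status")
--         if st not in counts:
--             continue
--         counts[st]["total"] += 1
--         if status == "WINNER":
--             counts[st]["win"] += 1
--
--     total_win = sum(c["win"] for c in counts.values())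
--     total_total = sum(c["total"] for c in counts.values())
--
--     return {
--         "total": {"win": total_win, "total": total_total},
--         "rnk":   counts["RNK"],
--         "ctr":   counts["CTR"],
--         "cr":    counts["CR"],
--         "link":  counts["LINK"],
--     }
-- ===== SOURCE B (Python) =====
-- def build_donuts(archive: dict) -> dict:
--     """Count win/total by sprint_type: one filter pass per category instead of
--     a single accumulation loop over a counts dict."""
--     completed = archive.get("experiments", [])
--
--     def donut(cat):
--         exps = [e for e in completed if e.get("sprint_type") == cat]
--         wins = [e for e in exps if e.get("status") == "WINNER"]
--         return len(wins), len(exps)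
--
--     w_rnk, t_rnk = donut("RNK")
--     w_ctr, t_ctr = donut("CTR")
--     w_cr, t_cr = donut("CR")
--     w_link, t_link = donut("LINK")
--
--     return {
--         "total": {"win": w_rnk + w_ctr + w_cr + w_link,
--                   "total": t_rnk + t_ctr + t_cr + t_link},
--         "rnk":  {"win": w_rnk, "total": t_rnk},
--         "ctr":  {"win": w_ctr, "total": t_ctr},
--         "cr":   {"win": w_cr, "total": t_cr},
--         "link": {"win": w_link, "total": t_link},
--     }
-- ===== Notes on version B (the rewrite author's own statement) =====
-- stated objective: alternative
-- what changed: Replaces the single accumulation loop over a mutable counts dict with four independent per-category filter passes (filter by sprint_type, then by WINNER status) whose lengths give each donut, summing the four for the total.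
import Mathlib
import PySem

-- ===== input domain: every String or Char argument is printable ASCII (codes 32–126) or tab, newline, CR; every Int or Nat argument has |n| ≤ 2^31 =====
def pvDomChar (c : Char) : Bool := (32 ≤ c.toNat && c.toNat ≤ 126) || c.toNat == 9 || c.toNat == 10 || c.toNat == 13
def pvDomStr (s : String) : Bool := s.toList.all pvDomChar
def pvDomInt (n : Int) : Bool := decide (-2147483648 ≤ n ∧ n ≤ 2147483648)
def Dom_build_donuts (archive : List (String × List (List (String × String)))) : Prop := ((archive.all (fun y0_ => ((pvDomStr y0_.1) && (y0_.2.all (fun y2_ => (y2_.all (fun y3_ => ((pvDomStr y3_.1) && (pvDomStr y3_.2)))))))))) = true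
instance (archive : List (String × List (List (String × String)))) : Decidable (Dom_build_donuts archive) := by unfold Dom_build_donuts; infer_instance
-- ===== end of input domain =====

-- B replaces A's single accumulation loop over a mutable counts dict by four
-- independent per-category filter passes (objective: alternative decomposition).

-- ===== PORT A =====
-- one iteration of A's 'for exp in completed' loop over the mutable counts dict
-- (counts[st]["total"] / counts[st]["win"] are plain indexing on keys that are
-- always present, ported as getD-based modify with default 0)
def pvStep (d : PySem.Dict String (PySem.Dict String Int)) (exp : List (String × String)) : PySem.Dict String (PySem.Dict String Int) :=
  let st := (PySem.Dict.mk exp).get? "sprint_type"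
  let status := (PySem.Dict.mk exp).get? "status"
  match st with
  | none => d          -- st (= None) not in counts: continue
  | some s =>
    if d.contains s then
      let d1 := d.modify s PySem.Dict.empty (fun c => c.modify "total" 0 (· + 1))
      if status == some "WINNER" then
        d1.modify s PySem.Dict.empty (fun c => c.modify "win" 0 (· + 1))
      else d1
    else d             -- st not in counts: continue

def build_donuts (archive : List (String × List (List (String × String)))) : List (String × List (String × Int)) :=
  let completed := (PySem.Dict.mk archive).getD "experiments" []
  let categories : List String := ["RNK", "CTR", "CR", "LINK"]
  let counts0 := categories.foldl
    (fun d cat => d.insert cat (PySem.Dict.ofList [("win", (0 : Int)), ("total", (0 : Int))]))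
    PySem.Dict.empty
  let counts := completed.foldl pvStep counts0
  let total_win := (counts.values.map (fun c => c.getD "win" 0)).sum
  let total_total := (counts.values.map (fun c => c.getD "total" 0)).sum
  [("total", [("win", total_win), ("total", total_total)]),
   ("rnk", (counts.getD "RNK" PySem.Dict.empty).items),
   ("ctr", (counts.getD "CTR" PySem.Dict.empty).items),
   ("cr",  (counts.getD "CR" PySem.Dict.empty).items),
   ("link", (counts.getD "LINK" PySem.Dict.empty).items)]

-- ===== PORT B =====
-- donut(cat): exps = [e for e in completed if e.get("sprint_type") == cat];
--             wins = [e for e in exps if e.get("status") == "WINNER"]; (len(wins), len(exps))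
def pvDonut (completed : List (List (String × String))) (cat : String) : Int × Int :=
  let exps := completed.filter (fun e => (PySem.Dict.mk e).get? "sprint_type" == some cat)
  let wins := exps.filter (fun e => (PySem.Dict.mk e).get? "status" == some "WINNER")
  ((wins.length : Int), (exps.length : Int))

def build_donuts_alt (archive : List (String × List (List (String × String)))) : List (String × List (String × Int)) :=
  let completed := (PySem.Dict.mk archive).getD "experiments" []
  let r := pvDonut completed "RNK"
  let c := pvDonut completed "CTR"
  let q := pvDonut completed "CR"
  let l := pvDonut completed "LINK"
  [("total", [("win", r.1 + c.1 + q.1 + l.1), ("total", r.2 + c.2 + q.2 + l.2)]),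
   ("rnk",  [("win", r.1), ("total", r.2)]),
   ("ctr",  [("win", c.1), ("total", c.2)]),
   ("cr",   [("win", q.1), ("total", q.2)]),
   ("link", [("win", l.1), ("total", l.2)])]

-- ===== PRECONDITION & SPEC =====
def Spec_build_donuts (archive : List (String × List (List (String × String)))) (out : List (String × List (String × Int))) : Prop := out = build_donuts_alt archive
instance (archive : List (String × List (List (String × String)))) (out : List (String × List (String × Int))) : Decidable (Spec_build_donuts archive out) := by unfold Spec_build_donuts; infer_instance

-- ===== CLAIM (what is proved, stated in full; the proofs are below) =====
def Claim_equal_build_donuts : Prop := ∀ (archive : List (String × List (List (String × String)))), Dom_build_donuts archive → Spec_build_donuts archive (build_donuts archive)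

-- ===== LEMMAS AND PROOFS =====

-- canonical shape of A's counts dict during A's loop
def pvMk (wr tr wc tc wq tq wl tl : Int) : PySem.Dict String (PySem.Dict String Int) :=
  PySem.Dict.mk
    [("RNK",  PySem.Dict.mk [("win", wr), ("total", tr)]),
     ("CTR",  PySem.Dict.mk [("win", wc), ("total", tc)]),
     ("CR",   PySem.Dict.mk [("win", wq), ("total", tq)]),
     ("LINK", PySem.Dict.mk [("win", wl), ("total", tl)])]

lemma pvDonut_cons (e : List (String × String)) (l : List (List (String × String))) (cat : String) :
    pvDonut (e :: l) cat =
      (if (PySem.Dict.mk e).get? "sprint_type" = some cat then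
        ((if (PySem.Dict.mk e).get? "status" = some "WINNER" then 1 else 0) + (pvDonut l cat).1,
         1 + (pvDonut l cat).2)
      else pvDonut l cat) := by
  simp only [pvDonut, List.filter_cons]
  split_ifs with h1 h2 <;> simp_all <;> ring_nf
  all_goals simp

lemma pvStep_none (wr tr wc tc wq tq wl tl : Int) (e : List (String × String))
    (h : (PySem.Dict.mk e).get? "sprint_type" = none) :
    pvStep (pvMk wr tr wc tc wq tq wl tl) e = pvMk wr tr wc tc wq tq wl tl := by
  simp only [pvStep]; rw [h]

lemma pvStep_other (wr tr wc tc wq tq wl tl : Int) (e : List (String × String)) (s : String)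
    (h : (PySem.Dict.mk e).get? "sprint_type" = some s)
    (h1 : s ≠ "RNK") (h2 : s ≠ "CTR") (h3 : s ≠ "CR") (h4 : s ≠ "LINK") :
    pvStep (pvMk wr tr wc tc wq tq wl tl) e = pvMk wr tr wc tc wq tq wl tl := by
  simp only [pvStep]; rw [h]
  simp [pvMk, PySem.Dict.contains, Ne.symm h1, Ne.symm h2, Ne.symm h3, Ne.symm h4]

lemma pvStep_rnk (wr tr wc tc wq tq wl tl : Int) (e : List (String × String))
    (h : (PySem.Dict.mk e).get? "sprint_type" = some "RNK") :
    pvStep (pvMk wr tr wc tc wq tq wl tl) e =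
      pvMk (wr + (if (PySem.Dict.mk e).get? "status" = some "WINNER" then 1 else 0)) (tr + 1)
        wc tc wq tq wl tl := by
  simp only [pvStep]; rw [h]
  cases h2 : ((PySem.Dict.mk e).get? "status" == some "WINNER")
  · rw [if_neg (by simpa using beq_eq_false_iff_ne.mp h2)]
    simp [pvMk, PySem.Dict.contains, PySem.Dict.modify, PySem.Dict.getD, PySem.Dict.get?, PySem.Dict.insert]
  · rw [if_pos (by simpa using h2)]
    simp [pvMk, PySem.Dict.contains, PySem.Dict.modify, PySem.Dict.getD, PySem.Dict.get?, PySem.Dict.insert]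

lemma pvStep_ctr (wr tr wc tc wq tq wl tl : Int) (e : List (String × String))
    (h : (PySem.Dict.mk e).get? "sprint_type" = some "CTR") :
    pvStep (pvMk wr tr wc tc wq tq wl tl) e =
      pvMk wr tr (wc + (if (PySem.Dict.mk e).get? "status" = some "WINNER" then 1 else 0)) (tc + 1)
        wq tq wl tl := by
  simp only [pvStep]; rw [h]
  cases h2 : ((PySem.Dict.mk e).get? "status" == some "WINNER")
  · rw [if_neg (by simpa using beq_eq_false_iff_ne.mp h2)]
    simp [pvMk, PySem.Dict.contains, PySem.Dict.modify, PySem.Dict.getD, PySem.Dict.get?, PySem.Dict.insert]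
  · rw [if_pos (by simpa using h2)]
    simp [pvMk, PySem.Dict.contains, PySem.Dict.modify, PySem.Dict.getD, PySem.Dict.get?, PySem.Dict.insert]

lemma pvStep_cr (wr tr wc tc wq tq wl tl : Int) (e : List (String × String))
    (h : (PySem.Dict.mk e).get? "sprint_type" = some "CR") :
    pvStep (pvMk wr tr wc tc wq tq wl tl) e =
      pvMk wr tr wc tc (wq + (if (PySem.Dict.mk e).get? "status" = some "WINNER" then 1 else 0)) (tq + 1)
        wl tl := by
  simp only [pvStep]; rw [h]
  cases h2 : ((PySem.Dict.mk e).get? "status" == some "WINNER")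
  · rw [if_neg (by simpa using beq_eq_false_iff_ne.mp h2)]
    simp [pvMk, PySem.Dict.contains, PySem.Dict.modify, PySem.Dict.getD, PySem.Dict.get?, PySem.Dict.insert]
  · rw [if_pos (by simpa using h2)]
    simp [pvMk, PySem.Dict.contains, PySem.Dict.modify, PySem.Dict.getD, PySem.Dict.get?, PySem.Dict.insert]

lemma pvStep_link (wr tr wc tc wq tq wl tl : Int) (e : List (String × String))
    (h : (PySem.Dict.mk e).get? "sprint_type" = some "LINK") :
    pvStep (pvMk wr tr wc tc wq tq wl tl) e =
      pvMk wr tr wc tc wq tq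
        (wl + (if (PySem.Dict.mk e).get? "status" = some "WINNER" then 1 else 0)) (tl + 1) := by
  simp only [pvStep]; rw [h]
  cases h2 : ((PySem.Dict.mk e).get? "status" == some "WINNER")
  · rw [if_neg (by simpa using beq_eq_false_iff_ne.mp h2)]
    simp [pvMk, PySem.Dict.contains, PySem.Dict.modify, PySem.Dict.getD, PySem.Dict.get?, PySem.Dict.insert]
  · rw [if_pos (by simpa using h2)]
    simp [pvMk, PySem.Dict.contains, PySem.Dict.modify, PySem.Dict.getD, PySem.Dict.get?, PySem.Dict.insert]

lemma pvStep_loop (l : List (List (String × String))) :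
    ∀ wr tr wc tc wq tq wl tl : Int,
    l.foldl pvStep (pvMk wr tr wc tc wq tq wl tl) =
      pvMk (wr + (pvDonut l "RNK").1) (tr + (pvDonut l "RNK").2)
           (wc + (pvDonut l "CTR").1) (tc + (pvDonut l "CTR").2)
           (wq + (pvDonut l "CR").1)  (tq + (pvDonut l "CR").2)
           (wl + (pvDonut l "LINK").1) (tl + (pvDonut l "LINK").2) := by
  induction l with
  | nil => intro wr tr wc tc wq tq wl tl; simp [pvDonut]
  | cons e l ih =>
    intro wr tr wc tc wq tq wl tl
    simp only [List.foldl_cons]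
    rcases h : (PySem.Dict.mk e).get? "sprint_type" with _ | s
    · rw [pvStep_none _ _ _ _ _ _ _ _ _ h, ih]
      simp [pvDonut_cons, h]
    · by_cases hR : s = "RNK"
      · subst hR
        rw [pvStep_rnk _ _ _ _ _ _ _ _ _ h, ih]
        simp only [pvDonut_cons, h, Option.some.injEq, String.reduceEq, reduceIte]
        split_ifs <;>
          (simp only [pvMk, PySem.Dict.mk.injEq, List.cons.injEq, Prod.mk.injEq, and_true, true_and]
           and_intros <;> ring)
      · by_cases hC : s = "CTR"
        · subst hC
          rw [pvStep_ctr _ _ _ _ _ _ _ _ _ h, ih]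
          simp only [pvDonut_cons, h, Option.some.injEq, String.reduceEq, reduceIte]
          split_ifs <;>
            (simp only [pvMk, PySem.Dict.mk.injEq, List.cons.injEq, Prod.mk.injEq, and_true, true_and]
             and_intros <;> ring)
        · by_cases hQ : s = "CR"
          · subst hQ
            rw [pvStep_cr _ _ _ _ _ _ _ _ _ h, ih]
            simp only [pvDonut_cons, h, Option.some.injEq, String.reduceEq, reduceIte]
            split_ifs <;>
              (simp only [pvMk, PySem.Dict.mk.injEq, List.cons.injEq, Prod.mk.injEq, and_true, true_and]
               and_intros <;> ring)
          · by_cases hL : s = "LINK"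
            · subst hL
              rw [pvStep_link _ _ _ _ _ _ _ _ _ h, ih]
              simp only [pvDonut_cons, h, Option.some.injEq, String.reduceEq, reduceIte]
              split_ifs <;>
                (simp only [pvMk, PySem.Dict.mk.injEq, List.cons.injEq, Prod.mk.injEq, and_true, true_and]
                 and_intros <;> ring)
            · rw [pvStep_other _ _ _ _ _ _ _ _ _ _ h hR hC hQ hL, ih]
              simp [pvDonut_cons, h, hR, hC, hQ, hL]

-- ===== VERDICT (by name: the statement is the Claim_ definition above) =====
theorem build_donuts_spec : Claim_equal_build_donuts := by
  unfold Claim_equal_build_donuts Spec_build_donuts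
  intro archive _
  unfold build_donuts build_donuts_alt
  have h0 : (["RNK","CTR","CR","LINK"] : List String).foldl
      (fun d cat => d.insert cat (PySem.Dict.ofList [("win",(0:Int)),("total",(0:Int))])) PySem.Dict.empty
      = pvMk 0 0 0 0 0 0 0 0 := by decide
  simp only [h0, pvStep_loop, zero_add]
  simp [pvMk, PySem.Dict.values, PySem.Dict.getD, PySem.Dict.get?]
  and_intros <;> ring
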